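-- pv_equiv track=rewrite | github.com/DragunWF/Competitive-Programming | CodeWars/python/7_kyu/cinemas_in_2020.py | maximum_seating
-- ===== SOURCE A (Python) =====
-- def maximum_seating(arr: list[int]) -> int:
--     maximum_seats = 0
--     for i, num in enumerate(arr):
--         if num == 0:
--             is_left_clear = (i - 1 < 0 or arr[i - 1] == 0) and (i - 2 < 0 or arr[i - 2] == 0)
--             is_right_clear = (i + 1 >= len(arr) or arr[i + 1] == 0) and (i + 2 >= len(arr) or arr[i + 2] == 0)
--             if is_left_clear and is_right_clear:
--                 arr[i] = 1
--                 maximum_seats += 1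
--     return maximum_seats
-- ===== SOURCE B (Python) =====
-- def maximum_seating(arr: list[int]) -> int:
--     n = len(arr)
--     avail = [all(arr[j] == 0 for j in range(max(0, i - 2), min(n, i + 3)))
--              for i in range(n)]
--     count = 0
--     last = -10
--     for i in range(n):
--         if avail[i] and i - last >= 3:
--             arr[i] = 1
--             count += 1
--             last = i
--     return count
-- ===== Notes on version B (the rewrite author's own statement) =====
-- stated objective: alternative
-- what changed: Replaces A's in-place 4-neighbour scan over the mutating array with a precomputed availability table over the original array followed by a greedy pass tracking the last placed index with a >=3 spacing rule.
import Mathlib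
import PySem

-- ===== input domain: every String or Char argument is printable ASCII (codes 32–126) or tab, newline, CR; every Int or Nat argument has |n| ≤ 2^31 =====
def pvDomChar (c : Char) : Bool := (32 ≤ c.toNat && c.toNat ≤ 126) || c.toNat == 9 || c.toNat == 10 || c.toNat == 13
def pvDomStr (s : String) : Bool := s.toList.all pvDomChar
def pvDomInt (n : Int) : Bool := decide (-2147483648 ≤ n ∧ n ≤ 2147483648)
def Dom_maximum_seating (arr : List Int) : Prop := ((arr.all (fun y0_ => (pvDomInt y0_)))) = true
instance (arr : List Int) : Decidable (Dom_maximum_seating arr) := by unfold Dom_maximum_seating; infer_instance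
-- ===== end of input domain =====

-- B replaces A's neighbour scan over the mutating array by an availability table over the
-- original array plus a spacing-tracked greedy pass; equal return value (and the same
-- in-place mutation in Python) on every input.

-- ===== PORT A =====
-- A's loop: index i over arr, state = (current array, count); left guards read the
-- (possibly mutated) array, right guards read positions not yet reachable by mutation.
def loopA (a : List Int) (i : Nat) (cnt : Int) : Int :=
  if h : i < a.length then
    (if a.getD i 0 == 0 then
      let lc := ((decide (i < 1)) || a.getD (i - 1) 0 == 0) &&
                ((decide (i < 2)) || a.getD (i - 2) 0 == 0)
      let rc := ((decide (i + 1 ≥ a.length)) || a.getD (i + 1) 0 == 0) &&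
                ((decide (i + 2 ≥ a.length)) || a.getD (i + 2) 0 == 0)
      if lc && rc then loopA (a.set i 1) (i + 1) (cnt + 1)
      else loopA a (i + 1) cnt
    else loopA a (i + 1) cnt)
  else cnt
termination_by a.length - i
decreasing_by all_goals simp_all; omega

def maximum_seating (arr : List Int) : Int := loopA arr 0 0

-- ===== PORT B =====
-- avail[i] = all cells of the ORIGINAL array in the window [max(0,i-2), min(n,i+3)) are 0
def availB (arr : List Int) : List Bool :=
  (List.range arr.length).map (fun i =>
    (List.range' (i - 2) (min arr.length (i + 3) - (i - 2))).all
      (fun j => arr.getD j 0 == 0))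

def loopB (avail : List Bool) (i : Nat) (last : Int) (cnt : Int) : Int :=
  if h : i < avail.length then
    (if avail.getD i false && decide ((i : Int) - last ≥ 3) then
      loopB avail (i + 1) (i : Int) (cnt + 1)
    else loopB avail (i + 1) last cnt)
  else cnt
termination_by avail.length - i

def maximum_seating_alt (arr : List Int) : Int := loopB (availB arr) 0 (-10) 0

-- ===== PRECONDITION & SPEC =====
def Spec_maximum_seating (arr : List Int) (out : Int) : Prop := out = maximum_seating_alt arr
instance (arr : List Int) (out : Int) : Decidable (Spec_maximum_seating arr out) := by unfold Spec_maximum_seating; infer_instance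

-- ===== CLAIM (what is proved, stated in full; the proofs are below) =====
def Claim_equal_maximum_seating : Prop := ∀ (arr : List Int), Dom_maximum_seating arr → Spec_maximum_seating arr (maximum_seating arr)

-- ===== LEMMAS AND PROOFS =====

theorem availB_length (arr : List Int) : (availB arr).length = arr.length := by
  simp [availB]

theorem availB_getD (arr : List Int) (i : Nat) (h : i < arr.length) :
    (availB arr).getD i false =
      (List.range' (i - 2) (min arr.length (i + 3) - (i - 2))).all
        (fun j => arr.getD j 0 == 0) := by
  simp [availB, List.getD, h]

-- the pure window condition, as a Prop
def WinZero (arr : List Int) (i : Nat) : Prop :=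
  ∀ j : Nat, j < arr.length → i ≤ j + 2 → j ≤ i + 2 → arr.getD j 0 = 0

theorem window_all_iff (arr : List Int) (i : Nat) (h : i < arr.length) :
    ((List.range' (i - 2) (min arr.length (i + 3) - (i - 2))).all
        (fun j => arr.getD j 0 == 0) = true) ↔ WinZero arr i := by
  simp only [List.all_eq_true, List.mem_range', beq_iff_eq, WinZero]
  constructor
  · intro H j hj h1 h2
    exact H j ⟨j - (i - 2), by omega, by omega⟩
  · rintro H j ⟨m, hm, rfl⟩
    exact H (i - 2 + 1 * m) (by omega) (by omega) (by omega)

theorem condA_iff (arr : List Int) (i : Nat) (h : i < arr.length) :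
    ((arr.getD i 0 == 0) &&
      ((((decide (i < 1)) || arr.getD (i - 1) 0 == 0) &&
        ((decide (i < 2)) || arr.getD (i - 2) 0 == 0)) &&
       (((decide (i + 1 ≥ arr.length)) || arr.getD (i + 1) 0 == 0) &&
        ((decide (i + 2 ≥ arr.length)) || arr.getD (i + 2) 0 == 0)))) = true
    ↔ WinZero arr i := by
  simp only [Bool.and_eq_true, Bool.or_eq_true, decide_eq_true_eq, beq_iff_eq, WinZero]
  constructor
  · rintro ⟨h0, ⟨hl1, hl2⟩, ⟨hr1, hr2⟩⟩ j hj h1 h2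
    have : j + 2 = i ∨ j + 1 = i ∨ j = i ∨ j = i + 1 ∨ j = i + 2 := by omega
    rcases this with hc | hc | hc | hc | hc
    · rcases hl2 with hlt | hz
      · omega
      · have : i - 2 = j := by omega
        rwa [this] at hz
    · rcases hl1 with hlt | hz
      · omega
      · have : i - 1 = j := by omega
        rwa [this] at hz
    · rwa [hc]
    · rcases hr1 with hlt | hz
      · omega
      · rwa [hc]
    · rcases hr2 with hlt | hz
      · omega
      · rwa [hc]
  · intro H
    refine ⟨H i h (by omega) (by omega), ⟨?_, ?_⟩, ⟨?_, ?_⟩⟩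
    · by_cases h1 : i < 1
      · exact Or.inl (by simpa using h1)
      · exact Or.inr (H (i - 1) (by omega) (by omega) (by omega))
    · by_cases h1 : i < 2
      · exact Or.inl (by simpa using h1)
      · exact Or.inr (H (i - 2) (by omega) (by omega) (by omega))
    · by_cases h1 : i + 1 ≥ arr.length
      · exact Or.inl (by simpa using h1)
      · exact Or.inr (H (i + 1) (by omega) (by omega) (by omega))
    · by_cases h1 : i + 2 ≥ arr.length
      · exact Or.inl (by simpa using h1)
      · exact Or.inr (H (i + 2) (by omega) (by omega) (by omega))

-- the main coupling invariant: A's loop over the mutating array equals B's greedy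
-- pass over the availability table, where `last` is the most recent placed index
theorem loop_eq (arr : List Int) :
    ∀ (k : Nat) (a : List Int) (i : Nat) (last cnt : Int),
    a.length = arr.length → arr.length - i = k →
    last < (i : Int) →
    (last = -10 ∨ (0 ≤ last ∧ last.toNat < arr.length ∧ a.getD last.toNat 0 = 1)) →
    (∀ j : Nat, last < (j : Int) → j < arr.length → a.getD j 0 = arr.getD j 0) →
    loopA a i cnt = loopB (availB arr) i last cnt := by
  intro k
  induction k with
  | zero =>
    intro a i last cnt hlen hk _ _ _
    have hi : ¬ i < a.length := by omega
    have hi' : ¬ i < (availB arr).length := by rw [availB_length]; omega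
    rw [loopA, loopB]; simp [hi, hi']
  | succ k ih =>
    intro a i last cnt hlen hk hlt hplaced hsuf
    by_cases hi : i < arr.length
    case neg =>
      have hia : ¬ i < a.length := by omega
      have hi' : ¬ i < (availB arr).length := by rw [availB_length]; omega
      rw [loopA, loopB]; simp [hia, hi']
    case pos =>
    have hia : i < a.length := by omega
    have hi' : i < (availB arr).length := by rw [availB_length]; omega
    rw [loopA, loopB, dif_pos hia, dif_pos hi']
    simp only []
    by_cases hsp : (i : Int) - last ≥ 3
    · -- spacing OK: a agrees with arr on the whole window; conditions coincide
      have hagree : ∀ j : Nat, i ≤ j + 2 → j < arr.length → a.getD j 0 = arr.getD j 0 := by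
        intro j h1 h2
        exact hsuf j (by omega) h2
      have e0 : a.getD i 0 = arr.getD i 0 := hagree i (by omega) hi
      have e1 : ((decide (i < 1)) || a.getD (i - 1) 0 == 0)
              = ((decide (i < 1)) || arr.getD (i - 1) 0 == 0) := by
        by_cases h1 : i < 1
        · simp [h1]
        · simp only [h1, decide_false, Bool.false_or]
          rw [hagree (i - 1) (by omega) (by omega)]
      have e2 : ((decide (i < 2)) || a.getD (i - 2) 0 == 0)
              = ((decide (i < 2)) || arr.getD (i - 2) 0 == 0) := by
        by_cases h1 : i < 2
        · simp [h1]
        · simp only [h1, decide_false, Bool.false_or]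
          rw [hagree (i - 2) (by omega) (by omega)]
      have e3 : ((decide (i + 1 ≥ a.length)) || a.getD (i + 1) 0 == 0)
              = ((decide (i + 1 ≥ arr.length)) || arr.getD (i + 1) 0 == 0) := by
        rw [hlen]
        by_cases h1 : i + 1 ≥ arr.length
        · simp [h1]
        · simp only [h1, decide_false, Bool.false_or]
          rw [hagree (i + 1) (by omega) (by omega)]
      have e4 : ((decide (i + 2 ≥ a.length)) || a.getD (i + 2) 0 == 0)
              = ((decide (i + 2 ≥ arr.length)) || arr.getD (i + 2) 0 == 0) := by
        rw [hlen]
        by_cases h1 : i + 2 ≥ arr.length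
        · simp [h1]
        · simp only [h1, decide_false, Bool.false_or]
          rw [hagree (i + 2) (by omega) (by omega)]
      rw [e0, e1, e2, e3, e4]
      have hspB : decide ((i : Int) - last ≥ 3) = true := by simpa using hsp
      by_cases hwin : WinZero arr i
      · -- both place a seat at i
        have hA : ((arr.getD i 0 == 0) &&
            ((((decide (i < 1)) || arr.getD (i - 1) 0 == 0) &&
              ((decide (i < 2)) || arr.getD (i - 2) 0 == 0)) &&
             (((decide (i + 1 ≥ arr.length)) || arr.getD (i + 1) 0 == 0) &&
              ((decide (i + 2 ≥ arr.length)) || arr.getD (i + 2) 0 == 0)))) = true :=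
          (condA_iff arr i hi).mpr hwin
        have hB : (availB arr).getD i false = true := by
          rw [availB_getD arr i hi]; exact (window_all_iff arr i hi).mpr hwin
        simp only [Bool.and_eq_true] at hA
        obtain ⟨hA0, hAl, hAr⟩ := hA
        obtain ⟨hAl1, hAl2⟩ := hAl
        obtain ⟨hAr1, hAr2⟩ := hAr
        rw [if_pos hA0, if_pos (by rw [hAl1, hAl2, hAr1, hAr2]; rfl),
            if_pos (by rw [hB, hspB]; rfl)]
        apply ih ((a.set i 1)) (i + 1) (i : Int) (cnt + 1)
          (by simp [hlen]) (by omega) (by omega)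
        · right
          refine ⟨by omega, by simpa using hi, ?_⟩
          simp [List.getD, List.getElem?_set_self hia]
        · intro j hj hjn
          have hne : i ≠ j := by omega
          simp only [List.getD, List.getElem?_set_ne hne]
          exact hsuf j (by omega) hjn
      · -- neither places
        have hB : (availB arr).getD i false = false := by
          rw [availB_getD arr i hi]
          by_contra hc
          exact hwin ((window_all_iff arr i hi).mp (by simpa using hc))
        rw [if_neg (show ¬ ((availB arr).getD i false && decide ((i:Int) - last ≥ 3)) = true by rw [hB]; simp)]
        have hrec := ih a (i + 1) last cnt hlen (by omega) (by omega) hplaced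
          (fun j hj hjn => hsuf j (by omega) hjn)
        by_cases h0 : (arr.getD i 0 == 0) = true
        · have hAfalse : ¬ ((((decide (i < 1)) || arr.getD (i - 1) 0 == 0) &&
              ((decide (i < 2)) || arr.getD (i - 2) 0 == 0)) &&
             (((decide (i + 1 ≥ arr.length)) || arr.getD (i + 1) 0 == 0) &&
              ((decide (i + 2 ≥ arr.length)) || arr.getD (i + 2) 0 == 0))) = true := by
            intro hc
            exact hwin ((condA_iff arr i hi).mp (by rw [h0, hc]; rfl))
          rw [if_pos h0, if_neg (by simpa using hAfalse)]
          exact hrec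
        · rw [if_neg h0]
          exact hrec
    · -- spacing fails: last ∈ {i-1, i-2}, a[last] = 1 blocks A's left guard; B skips too
      have hlast0 : 0 ≤ last := by
        rcases hplaced with h | ⟨h, _, _⟩
        · omega
        · exact h
      obtain ⟨hl1, hl2, hl3⟩ := hplaced.resolve_left (by omega)
      rw [if_neg (show ¬ ((availB arr).getD i false && decide ((i:Int) - last ≥ 3)) = true by simp [hsp])]
      have hrec := ih a (i + 1) last cnt hlen (by omega) (by omega)
        (Or.inr ⟨hl1, hl2, hl3⟩) (fun j hj hjn => hsuf j (by omega) hjn)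
      by_cases h0 : (a.getD i 0 == 0) = true
      · rw [if_pos h0]
        have hAcase : last.toNat + 1 = i ∨ last.toNat + 2 = i := by omega
        have hAfalse : ¬ ((((decide (i < 1)) || a.getD (i - 1) 0 == 0) &&
              ((decide (i < 2)) || a.getD (i - 2) 0 == 0)) &&
             (((decide (i + 1 ≥ a.length)) || a.getD (i + 1) 0 == 0) &&
              ((decide (i + 2 ≥ a.length)) || a.getD (i + 2) 0 == 0))) = true := by
          intro hcond
          simp only [Bool.and_eq_true, Bool.or_eq_true, decide_eq_true_eq, beq_iff_eq] at hcond
          rcases hAcase with hc | hc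
          · rcases hcond.1.1 with h' | h'
            · omega
            · rw [show i - 1 = last.toNat by omega, hl3] at h'
              exact absurd h' one_ne_zero
          · rcases hcond.1.2 with h' | h'
            · omega
            · rw [show i - 2 = last.toNat by omega, hl3] at h'
              exact absurd h' one_ne_zero
        rw [if_neg (by simpa using hAfalse)]
        exact hrec
      · rw [if_neg h0]
        exact hrec

-- ===== VERDICT (by name: the statement is the Claim_ definition above) =====
theorem maximum_seating_spec : Claim_equal_maximum_seating := by
  intro arr _
  unfold Spec_maximum_seating maximum_seating maximum_seating_alt
  exact loop_eq arr (arr.length - 0) arr 0 (-10) 0 rfl rfl (by omega)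
    (Or.inl rfl) (fun j _ _ => rfl)
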